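-- pv_equiv track=rewrite | github.com/mtiepelt/QuantumLatticeEnumeration | fplll_experiments/tree.py | extract_distribution
-- ===== SOURCE A (Python) =====
-- def extract_distribution(vals):
--     distr = {}
--     for key, val in vals:
--         lvl = key.count('-')
--         if lvl not in distr:
--             distr[lvl] = []
--         distr[lvl].append(val)
--     return distr
-- ===== SOURCE B (Python) =====
-- def extract_distribution(vals):
--     levels = [k.count('-') for k, _ in vals]
--     return {l: [v for k, v in vals if k.count('-') == l]
--             for l in dict.fromkeys(levels)}
-- ===== Notes on version B (the rewrite author's own statement) =====
-- stated objective: alternative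
-- what changed: Replaces the single-pass mutating dict build with a declarative two-pass form: compute the distinct dash-count levels in first-occurrence order via dict.fromkeys, then a dict comprehension that filters vals per level.
import Mathlib
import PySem

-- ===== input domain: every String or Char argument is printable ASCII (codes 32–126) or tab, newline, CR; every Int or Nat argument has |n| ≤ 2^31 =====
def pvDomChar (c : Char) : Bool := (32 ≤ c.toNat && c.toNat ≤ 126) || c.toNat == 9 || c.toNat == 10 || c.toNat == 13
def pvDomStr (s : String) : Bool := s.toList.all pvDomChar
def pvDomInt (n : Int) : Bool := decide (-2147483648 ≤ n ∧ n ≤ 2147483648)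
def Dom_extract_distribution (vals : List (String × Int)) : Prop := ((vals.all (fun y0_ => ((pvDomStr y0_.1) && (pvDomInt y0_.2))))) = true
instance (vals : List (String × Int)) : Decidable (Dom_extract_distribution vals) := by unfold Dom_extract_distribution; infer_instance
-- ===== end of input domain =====

-- B replaces A's single-pass mutating dict build with a declarative two-pass form
-- (distinct levels in first-occurrence order, then one filter pass per level); same value, no speed claim.

-- ===== PORT A =====
def extract_distribution (vals : List (String × Int)) : List (Int × List Int) :=
  (vals.foldl (fun distr kv =>
      let lvl : Int := (PySem.Str.count kv.1 "-" : Int)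
      let distr := if !distr.contains lvl then distr.insert lvl ([] : List Int) else distr
      distr.modify lvl [] (fun xs => xs ++ [kv.2]))
    PySem.Dict.empty).items

-- ===== PORT B =====
def extract_distribution_alt (vals : List (String × Int)) : List (Int × List Int) :=
  let levels := vals.map (fun kv => (PySem.Str.count kv.1 "-" : Int))
  (PySem.List.dedup levels).map (fun l =>
    (l, (vals.filter (fun kv => (PySem.Str.count kv.1 "-" : Int) == l)).map (fun kv => kv.2)))

-- ===== PRECONDITION & SPEC =====
def Spec_extract_distribution (vals : List (String × Int)) (out : List (Int × List Int)) : Prop := out = extract_distribution_alt vals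
instance (vals : List (String × Int)) (out : List (Int × List Int)) : Decidable (Spec_extract_distribution vals out) := by unfold Spec_extract_distribution; infer_instance

-- ===== CLAIM (what is proved, stated in full; the proofs are below) =====
def Claim_equal_extract_distribution : Prop := ∀ (vals : List (String × Int)), Dom_extract_distribution vals → Spec_extract_distribution vals (extract_distribution vals)

-- ===== LEMMAS AND PROOFS =====

-- A's "ensure key, then append" step is one modify with default [].
theorem ed_step_eq (d : PySem.Dict Int (List Int)) (lvl v : Int) :
    ((if !d.contains lvl then d.insert lvl ([] : List Int) else d).modify lvl [] (fun xs => xs ++ [v]))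
      = d.modify lvl [] (fun xs => xs ++ [v]) := by
  by_cases h : d.contains lvl = true
  · simp [h]
  · simp only [Bool.not_eq_true] at h
    simp [h, PySem.Dict.modify, PySem.Dict.getD_insert_self,
      PySem.Dict.getD_of_not_contains _ _ h, PySem.Dict.insert_insert_self]

theorem ed_fold_eq (vals : List (String × Int)) :
    vals.foldl (fun distr kv =>
        let lvl : Int := (PySem.Str.count kv.1 "-" : Int)
        let distr := if !distr.contains lvl then distr.insert lvl ([] : List Int) else distr
        distr.modify lvl [] (fun xs => xs ++ [kv.2])) PySem.Dict.empty
      = (vals.map (fun kv => ((PySem.Str.count kv.1 "-" : Int), kv.2))).foldl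
          (fun d p => d.modify p.1 [] (fun xs => xs ++ [p.2])) PySem.Dict.empty := by
  rw [List.foldl_map]
  exact PySem.List.foldl_congr_mem _ _ _ _ (fun d kv _ => ed_step_eq d _ kv.2)

-- ===== VERDICT (by name: the statement is the Claim_ definition above) =====
theorem extract_distribution_spec : Claim_equal_extract_distribution := by
  intro vals _
  show extract_distribution vals = extract_distribution_alt vals
  unfold extract_distribution extract_distribution_alt
  rw [ed_fold_eq]
  set g : (String × Int) → Int × Int := fun kv => ((PySem.Str.count kv.1 "-" : Int), kv.2) with hg
  have hnd : ((vals.map g).foldl (fun d p => d.modify p.1 [] (fun xs => xs ++ [p.2]))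
      PySem.Dict.empty).keys.Nodup := by
    exact PySem.Dict.nodup_keys_foldl_modify_key _ Prod.fst _ (fun _ p xs => xs ++ [p.2]) _
      (by simp)
  rw [PySem.Dict.items_eq_map_keys _ hnd []]
  have hkeys : ((vals.map g).foldl (fun d p => d.modify p.1 [] (fun xs => xs ++ [p.2]))
      PySem.Dict.empty).keys
      = PySem.Set.ofList (vals.map (fun kv => (PySem.Str.count kv.1 "-" : Int))) := by
    rw [PySem.Dict.keys_foldl_modify_key (vals.map g) Prod.fst [] (fun _ p xs => xs ++ [p.2])]
    simp only [PySem.Dict.keys_empty, PySem.Set.update_nil_left, List.map_map]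
    rfl
  rw [hkeys]
  simp only [PySem.List.dedup_eq_ofList]
  refine List.map_congr_left (fun l _ => ?_)
  rw [PySem.Dict.getD_foldl_modify_append (vals.map g) PySem.Dict.empty l]
  simp only [PySem.Dict.getD_empty, List.nil_append, List.filter_map, List.map_map]
  rfl
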